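-- pv_equiv track=rewrite | github.com/sjdigiovanni/netimate | netimate/plugins/device_commands/show_logging.py | summarise_result
-- ===== SOURCE A (Python) =====
-- from typing import Dict, List
--
-- def summarise_result(result: List[Dict]) -> str:
--     if not result:
--         return "[no log entries]"
--
--     severity_labels = {
--         "0": "Emergency",
--         "1": "Alert",
--         "2": "Critical",
--         "3": "Error",
--         "4": "Warning",
--         "5": "Notice",
--         "6": "Info",
--         "7": "Debug",
--     }
--
--     severity_counts = {str(i): 0 for i in range(8)}
--     for entry in result:
--         sev = entry.get("SEVERITY")
--         if sev in severity_counts: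
--             severity_counts[sev] += 1
--
--     parts = []
--     for sev, count in severity_counts.items():
--         if count:
--             label = severity_labels.get(sev, f"Severity {sev}")
--             parts.append(f"{count}x {label}")
--
--     return ", ".join(parts)
-- ===== SOURCE B (Python) =====
-- def summarise_result(result):
--     if not result:
--         return "[no log entries]"
--     labels = ["Emergency", "Alert", "Critical", "Error", "Warning", "Notice", "Info", "Debug"]
--     parts = []
--     for i, label in enumerate(labels):
--         n = sum(1 for entry in result if entry.get("SEVERITY") == str(i))
--         if n:
--             parts.append(f"{n}x {label}")
--     return ", ".join(parts)
-- ===== Notes on version B (the rewrite author's own statement) =====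
-- stated objective: alternative
-- what changed: Replaced the single-pass dict of severity counts (built then iterated via items) with a fixed loop over the eight severity codes in order, counting each severity by a direct scan of result with sum(...), appending nonzero parts immediately.
import Mathlib
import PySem

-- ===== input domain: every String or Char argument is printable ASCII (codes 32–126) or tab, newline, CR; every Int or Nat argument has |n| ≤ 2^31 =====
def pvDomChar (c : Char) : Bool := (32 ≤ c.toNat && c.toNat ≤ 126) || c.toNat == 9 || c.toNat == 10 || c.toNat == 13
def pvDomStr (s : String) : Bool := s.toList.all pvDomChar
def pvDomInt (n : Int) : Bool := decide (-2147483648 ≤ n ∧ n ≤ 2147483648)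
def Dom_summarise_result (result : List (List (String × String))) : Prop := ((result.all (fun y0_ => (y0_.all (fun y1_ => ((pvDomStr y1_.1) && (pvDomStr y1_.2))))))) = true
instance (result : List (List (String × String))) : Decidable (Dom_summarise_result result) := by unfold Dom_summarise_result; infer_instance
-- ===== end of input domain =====

-- B replaces A's single-pass severity-count dict with an in-order loop over the eight
-- severity codes, counting each by a direct scan of result (alternative decomposition, same result).


-- ===== PORT A =====
-- entry.get("SEVERITY") on a dict argument (association list under the type convention;
-- PySem.Dict.ofList mirrors dict construction). Used by both ports, as both Pythons call entry.get.
def pvGetSeverity (entry : List (String × String)) : Option String :=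
  (PySem.Dict.ofList entry).get? "SEVERITY"

def summarise_result (result : List (List (String × String))) : String :=
  if result = [] then "[no log entries]" else
  let severity_labels : PySem.Dict String String := PySem.Dict.ofList
    [("0", "Emergency"), ("1", "Alert"), ("2", "Critical"), ("3", "Error"),
     ("4", "Warning"), ("5", "Notice"), ("6", "Info"), ("7", "Debug")]
  let severity_counts : PySem.Dict String Int := PySem.Dict.ofList
    ((PySem.List.pyRange 0 8 1).map (fun i => (PySem.Int.toStr i, (0 : Int))))
  let severity_counts := result.foldl (fun d entry =>
    match pvGetSeverity entry with
    | some sev => if d.contains sev then d.modify sev 0 (· + 1) else d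
    | none => d) severity_counts
  let parts := severity_counts.items.foldl (fun ps p =>
    if p.2 ≠ 0 then
      ps ++ [PySem.Int.toStr p.2 ++ "x " ++ severity_labels.getD p.1 ("Severity " ++ p.1)]
    else ps) ([] : List String)
  PySem.Str.join ", " parts

-- ===== PORT B =====
def summarise_result_alt (result : List (List (String × String))) : String :=
  if result = [] then "[no log entries]" else
  let labels := ["Emergency", "Alert", "Critical", "Error", "Warning", "Notice", "Info", "Debug"]
  let parts := (PySem.List.enumerate labels).foldl (fun ps il =>
    let n : Int := result.foldl (fun n entry =>
      if pvGetSeverity entry == some (PySem.Int.toStr il.1) then n + 1 else n) 0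
    if n ≠ 0 then ps ++ [PySem.Int.toStr n ++ "x " ++ il.2] else ps) ([] : List String)
  PySem.Str.join ", " parts

-- ===== PRECONDITION & SPEC =====
def Spec_summarise_result (result : List (List (String × String))) (out : String) : Prop := out = summarise_result_alt result
instance (result : List (List (String × String))) (out : String) : Decidable (Spec_summarise_result result out) := by unfold Spec_summarise_result; infer_instance

-- ===== CLAIM (what is proved, stated in full; the proofs are below) =====
def Claim_equal_summarise_result : Prop := ∀ (result : List (List (String × String))), Dom_summarise_result result → Spec_summarise_result result (summarise_result result)

-- ===== LEMMAS AND PROOFS =====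

-- number of entries whose SEVERITY is the code c
def pvCnt (result : List (List (String × String))) (c : String) : Int :=
  (result.countP (fun e => pvGetSeverity e == some c) : Int)

-- B's inner sum(...) scan computes pvCnt
theorem foldl_count_eq (result : List (List (String × String))) (c : String) (a : Int) :
    result.foldl (fun n entry => if pvGetSeverity entry == some c then n + 1 else n) a
      = a + pvCnt result c := by
  induction result generalizing a with
  | nil => simp [pvCnt]
  | cons e rest ih =>
    rw [List.foldl_cons]
    by_cases h : (pvGetSeverity e == some c) = true
    · rw [if_pos h, ih]
      simp only [pvCnt, List.countP_cons, h, if_true]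
      push_cast
      ring
    · rw [if_neg h, ih]
      simp only [pvCnt, List.countP_cons, h]
      push_cast
      ring

-- arithmetic step for merging one entry's contribution into a running count
theorem pvAddCnt (n : Int) (b : Bool) (m : Nat) :
    n + (if b = true then (1 : Int) else 0) + (m : Int)
      = n + ((m + if b = true then 1 else 0 : Nat) : Int) := by
  cases b <;> push_cast <;> ring

-- one step of A's counting loop on the literal 8-key dict
theorem stepA (n0 n1 n2 n3 n4 n5 n6 n7 : Int) (e : List (String × String)) :
    (match pvGetSeverity e with
      | some sev =>
        if (PySem.Dict.mk [("0", n0), ("1", n1), ("2", n2), ("3", n3), ("4", n4), ("5", n5), ("6", n6), ("7", n7)]).contains sev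
        then (PySem.Dict.mk [("0", n0), ("1", n1), ("2", n2), ("3", n3), ("4", n4), ("5", n5), ("6", n6), ("7", n7)]).modify sev 0 (· + 1)
        else PySem.Dict.mk [("0", n0), ("1", n1), ("2", n2), ("3", n3), ("4", n4), ("5", n5), ("6", n6), ("7", n7)]
      | none => PySem.Dict.mk [("0", n0), ("1", n1), ("2", n2), ("3", n3), ("4", n4), ("5", n5), ("6", n6), ("7", n7)])
    = PySem.Dict.mk
        [("0", n0 + if pvGetSeverity e == some "0" then 1 else 0),
         ("1", n1 + if pvGetSeverity e == some "1" then 1 else 0),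
         ("2", n2 + if pvGetSeverity e == some "2" then 1 else 0),
         ("3", n3 + if pvGetSeverity e == some "3" then 1 else 0),
         ("4", n4 + if pvGetSeverity e == some "4" then 1 else 0),
         ("5", n5 + if pvGetSeverity e == some "5" then 1 else 0),
         ("6", n6 + if pvGetSeverity e == some "6" then 1 else 0),
         ("7", n7 + if pvGetSeverity e == some "7" then 1 else 0)] := by
  rcases h : pvGetSeverity e with _ | s
  · simp
  · by_cases h0 : s = "0"
    · subst h0; simp [PySem.Dict.modify, PySem.Dict.insert, PySem.Dict.contains,
        PySem.Dict.getD, PySem.Dict.get?]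
    · by_cases h1 : s = "1"
      · subst h1; simp [PySem.Dict.modify, PySem.Dict.insert, PySem.Dict.contains,
          PySem.Dict.getD, PySem.Dict.get?]
      · by_cases h2 : s = "2"
        · subst h2; simp [PySem.Dict.modify, PySem.Dict.insert, PySem.Dict.contains,
            PySem.Dict.getD, PySem.Dict.get?]
        · by_cases h3 : s = "3"
          · subst h3; simp [PySem.Dict.modify, PySem.Dict.insert, PySem.Dict.contains,
              PySem.Dict.getD, PySem.Dict.get?]
          · by_cases h4 : s = "4"
            · subst h4; simp [PySem.Dict.modify, PySem.Dict.insert, PySem.Dict.contains,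
                PySem.Dict.getD, PySem.Dict.get?]
            · by_cases h5 : s = "5"
              · subst h5; simp [PySem.Dict.modify, PySem.Dict.insert, PySem.Dict.contains,
                  PySem.Dict.getD, PySem.Dict.get?]
              · by_cases h6 : s = "6"
                · subst h6; simp [PySem.Dict.modify, PySem.Dict.insert, PySem.Dict.contains,
                    PySem.Dict.getD, PySem.Dict.get?]
                · by_cases h7 : s = "7"
                  · subst h7; simp [PySem.Dict.modify, PySem.Dict.insert, PySem.Dict.contains,
                      PySem.Dict.getD, PySem.Dict.get?]
                  · have hc : (PySem.Dict.mk [("0", n0), ("1", n1), ("2", n2), ("3", n3), ("4", n4), ("5", n5), ("6", n6), ("7", n7)] : PySem.Dict String Int).contains s = false := by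
                      simp [PySem.Dict.contains, Ne.symm h0, Ne.symm h1, Ne.symm h2,
                        Ne.symm h3, Ne.symm h4, Ne.symm h5, Ne.symm h6, Ne.symm h7]
                    simp [hc, beq_iff_eq, h0, h1, h2, h3, h4, h5, h6, h7]

-- A's whole counting loop, from arbitrary initial counts
theorem loopA (result : List (List (String × String))) (n0 n1 n2 n3 n4 n5 n6 n7 : Int) :
    result.foldl (fun d entry =>
      match pvGetSeverity entry with
      | some sev => if d.contains sev then d.modify sev 0 (· + 1) else d
      | none => d)
      (PySem.Dict.mk [("0", n0), ("1", n1), ("2", n2), ("3", n3), ("4", n4), ("5", n5), ("6", n6), ("7", n7)])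
    = PySem.Dict.mk
        [("0", n0 + pvCnt result "0"), ("1", n1 + pvCnt result "1"),
         ("2", n2 + pvCnt result "2"), ("3", n3 + pvCnt result "3"),
         ("4", n4 + pvCnt result "4"), ("5", n5 + pvCnt result "5"),
         ("6", n6 + pvCnt result "6"), ("7", n7 + pvCnt result "7")] := by
  induction result generalizing n0 n1 n2 n3 n4 n5 n6 n7 with
  | nil => simp [pvCnt]
  | cons e rest ih =>
    rw [List.foldl_cons, stepA, ih]
    simp only [pvCnt, List.countP_cons, pvAddCnt]

-- ===== VERDICT (by name: the statement is the Claim_ definition above) =====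
theorem summarise_result_spec : Claim_equal_summarise_result := by
  intro result _
  show summarise_result result = summarise_result_alt result
  unfold summarise_result summarise_result_alt
  by_cases hnil : result = []
  · simp [hnil]
  · simp only [hnil, if_false]
    have hinit : (PySem.Dict.ofList
        ((PySem.List.pyRange 0 8 1).map (fun i => (PySem.Int.toStr i, (0 : Int)))) : PySem.Dict String Int)
        = PySem.Dict.mk [("0", 0), ("1", 0), ("2", 0), ("3", 0), ("4", 0), ("5", 0), ("6", 0), ("7", 0)] := by
      decide
    rw [hinit, loopA]
    have hlab : (PySem.Dict.ofList
        [("0", "Emergency"), ("1", "Alert"), ("2", "Critical"), ("3", "Error"),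
         ("4", "Warning"), ("5", "Notice"), ("6", "Info"), ("7", "Debug")] : PySem.Dict String String)
        = PySem.Dict.mk
        [("0", "Emergency"), ("1", "Alert"), ("2", "Critical"), ("3", "Error"),
         ("4", "Warning"), ("5", "Notice"), ("6", "Info"), ("7", "Debug")] := by decide
    simp only [foldl_count_eq, zero_add]
    simp [hlab, List.find?, PySem.List.enumerate, PySem.Dict.getD, PySem.Dict.get?, List.foldl,
      show PySem.Int.toStr 0 = "0" from by decide, show PySem.Int.toStr 1 = "1" from by decide,
      show PySem.Int.toStr 2 = "2" from by decide, show PySem.Int.toStr 3 = "3" from by decide,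
      show PySem.Int.toStr 4 = "4" from by decide, show PySem.Int.toStr 5 = "5" from by decide,
      show PySem.Int.toStr 6 = "6" from by decide, show PySem.Int.toStr 7 = "7" from by decide]
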